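-- pv_equiv track=rewrite | github.com/jason660519/JobSpy-V2 | crawler_engine/core/processor.py | _normalize_experience_level
-- ===== SOURCE A (Python) =====
-- from typing import List, Dict, Any, Optional, Set, Tuple
--
-- def _normalize_experience_level(description: str) -> Optional[str]:
--     """從描述中推斷經驗等級"""
--     description_lower = description.lower()
--
--     if any(word in description_lower for word in ['senior', 'lead', 'principal', '5+ years', '7+ years']):
--         return 'senior'
--     elif any(word in description_lower for word in ['mid', 'intermediate', '2-5 years', '3+ years']):
--         return 'mid'
--     elif any(word in description_lower for word in ['junior', 'entry', 'graduate', '0-2 years']):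
--         return 'entry'
--
--     return None
-- ===== SOURCE B (Python) =====
-- from typing import Optional
--
-- # Keyword -> priority rank (0 = senior beats 1 = mid beats 2 = entry).
-- _KEYWORD_RANK = [
--     ('senior', 0), ('lead', 0), ('principal', 0), ('5+ years', 0), ('7+ years', 0),
--     ('mid', 1), ('intermediate', 1), ('2-5 years', 1), ('3+ years', 1),
--     ('junior', 2), ('entry', 2), ('graduate', 2), ('0-2 years', 2),
-- ]
-- _LEVELS = ['senior', 'mid', 'entry']
--
-- def _normalize_experience_level(description: str) -> Optional[str]:
--     d = description.lower()
--     best = 3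
--     for i in range(len(d)):
--         for kw, rank in _KEYWORD_RANK:
--             if rank < best and d.startswith(kw, i):
--                 best = rank
--     return _LEVELS[best] if best < 3 else None
-- ===== Notes on version B (the rewrite author's own statement) =====
-- stated objective: alternative
-- what changed: Instead of A's three priority-ordered any(keyword in text) substring searches, B makes a single left-to-right scan over the lowered text, checking at each position which keywords start there and tracking the minimum priority rank (0=senior,1=mid,2=entry), then maps the final rank to a level (3 = no match = None).
import Mathlib
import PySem

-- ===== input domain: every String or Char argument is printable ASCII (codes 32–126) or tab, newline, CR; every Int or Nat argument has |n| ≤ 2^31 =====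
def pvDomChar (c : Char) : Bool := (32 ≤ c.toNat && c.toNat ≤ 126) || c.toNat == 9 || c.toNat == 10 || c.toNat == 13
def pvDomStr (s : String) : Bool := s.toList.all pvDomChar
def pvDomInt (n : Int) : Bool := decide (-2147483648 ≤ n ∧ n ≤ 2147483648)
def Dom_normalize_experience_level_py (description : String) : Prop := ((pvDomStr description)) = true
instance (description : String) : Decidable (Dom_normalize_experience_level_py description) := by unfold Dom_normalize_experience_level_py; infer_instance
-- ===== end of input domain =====

-- B replaces A's three per-category substring searches by a single left-to-right positional
-- scan of the lowered text that tracks the minimum priority rank of any keyword starting at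
-- each position (alternative algorithm, same cost class).

-- ===== PORT A =====
def normalize_experience_level_py (description : String) : Option String :=
  let description_lower := PySem.Str.lower description
  if (["senior", "lead", "principal", "5+ years", "7+ years"]).any
      (fun word => PySem.Str.isIn word description_lower) then
    some "senior"
  else if (["mid", "intermediate", "2-5 years", "3+ years"]).any
      (fun word => PySem.Str.isIn word description_lower) then
    some "mid"
  else if (["junior", "entry", "graduate", "0-2 years"]).any
      (fun word => PySem.Str.isIn word description_lower) then
    some "entry"
  else
    none

-- ===== PORT B =====
-- keyword → priority rank (0 = senior beats 1 = mid beats 2 = entry)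
def pvKwRank : List (List Char × Nat) :=
  [("senior".toList, 0), ("lead".toList, 0), ("principal".toList, 0),
   ("5+ years".toList, 0), ("7+ years".toList, 0),
   ("mid".toList, 1), ("intermediate".toList, 1), ("2-5 years".toList, 1),
   ("3+ years".toList, 1),
   ("junior".toList, 2), ("entry".toList, 2), ("graduate".toList, 2),
   ("0-2 years".toList, 2)]

def pvLevels : List String := ["senior", "mid", "entry"]

-- the nested 'for i in range(len(d)): for kw, rank in _KEYWORD_RANK: …' loops as foldl;
-- d.startswith(kw, i) with 0 ≤ i is exactly 'kw is a prefix of d[i:]' = Chars.startswith (d.drop i) kw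
def normalize_experience_level_py_alt (description : String) : Option String :=
  let d := PySem.Chars.lower description.toList
  let best :=
    (List.range d.length).foldl
      (fun best i =>
        pvKwRank.foldl
          (fun best kr =>
            if kr.2 < best ∧ PySem.Chars.startswith (d.drop i) kr.1 = true then kr.2 else best)
          best)
      (3 : Nat)
  if best < 3 then pvLevels[best]? else none

-- ===== PRECONDITION & SPEC =====
def Spec_normalize_experience_level_py (description : String) (out : Option String) : Prop := out = normalize_experience_level_py_alt description
instance (description : String) (out : Option String) : Decidable (Spec_normalize_experience_level_py description out) := by unfold Spec_normalize_experience_level_py; infer_instance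

-- ===== CLAIM (what is proved, stated in full; the proofs are below) =====
def Claim_equal_normalize_experience_level_py : Prop := ∀ (description : String), Dom_normalize_experience_level_py description → Spec_normalize_experience_level_py description (normalize_experience_level_py description)

-- ===== LEMMAS AND PROOFS =====

-- the guarded step 'if rank < best ∧ match then rank else best' is a conditional min
theorem pvStep_eq_min (s : List Char) :
    (fun (b : Nat) (kr : List Char × Nat) =>
        if kr.2 < b ∧ PySem.Chars.startswith s kr.1 = true then kr.2 else b)
      = (fun b kr =>
        if PySem.Chars.startswith s kr.1 = true then min b kr.2 else b) := by
  funext b kr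
  by_cases h : PySem.Chars.startswith s kr.1 = true
  · simp only [h, and_true]
    rw [min_def]
    split_ifs <;> omega
  · simp [h]

-- a conditional-min fold is a min fold over the filtered ranks
theorem pvFoldl_if_min {α : Type} (P : α → Bool) (r : α → Nat) :
    ∀ (L : List α) (b : Nat),
      L.foldl (fun b x => if P x = true then min b (r x) else b) b
        = (L.filterMap (fun x => if P x = true then some (r x) else none)).foldl min b := by
  intro L
  induction L with
  | nil => intro b; rfl
  | cons x L ih =>
    intro b
    by_cases h : P x = true <;> simp [h, ih]

-- folding the inner min folds over an index list flattens to one min fold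
theorem pvFoldl_flatten {ι : Type} (F : ι → List Nat) :
    ∀ (I : List ι) (b : Nat),
      I.foldl (fun b i => (F i).foldl min b) b = (I.flatMap F).foldl min b := by
  intro I
  induction I with
  | nil => intro b; rfl
  | cons i I ih => intro b; simp [List.flatMap_cons, List.foldl_append, ih]

theorem pvFoldl_min_le_init : ∀ (L : List Nat) (b : Nat), L.foldl min b ≤ b := by
  intro L
  induction L with
  | nil => intro b; simp
  | cons x L ih => intro b; exact le_trans (ih _) (min_le_left _ _)

theorem pvFoldl_min_le_mem : ∀ (L : List Nat) (b x : Nat), x ∈ L → L.foldl min b ≤ x := by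
  intro L
  induction L with
  | nil => intro b x hx; cases hx
  | cons y L ih =>
    intro b x hx
    rcases List.mem_cons.mp hx with h | h
    · subst h; exact le_trans (pvFoldl_min_le_init L _) (min_le_right _ _)
    · exact ih _ _ h

theorem pvFoldl_min_eq_or_mem : ∀ (L : List Nat) (b : Nat),
    L.foldl min b = b ∨ L.foldl min b ∈ L := by
  intro L
  induction L with
  | nil => intro b; left; rfl
  | cons y L ih =>
    intro b
    rcases ih (min b y) with h | h
    · rcases Nat.le_total b y with hby | hyb
      · left; simpa [Nat.min_eq_left hby] using h
      · right
        have he : List.foldl min b (y :: L) = y := by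
          rw [List.foldl_cons, h]; omega
        simp [he]
    · right; exact List.mem_cons_of_mem _ h

-- the matched-rank list of B's scan
def pvMatched (d : List Char) : List Nat :=
  (List.range d.length).flatMap
    (fun i => pvKwRank.filterMap
      (fun kr => if PySem.Chars.startswith (d.drop i) kr.1 = true then some kr.2 else none))

theorem pvBest_eq (d : List Char) :
    (List.range d.length).foldl
      (fun best i =>
        pvKwRank.foldl
          (fun best kr =>
            if kr.2 < best ∧ PySem.Chars.startswith (d.drop i) kr.1 = true then kr.2 else best)
          best)
      3 = (pvMatched d).foldl min 3 := by
  unfold pvMatched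
  simp only [pvStep_eq_min, pvFoldl_if_min]
  rw [pvFoldl_flatten]

-- a rank is matched iff one of its keywords starts somewhere inside d
theorem pvMem_matched_iff (d : List Char) (r : Nat) :
    r ∈ pvMatched d ↔
      ∃ i < d.length, ∃ kr ∈ pvKwRank, kr.2 = r ∧
        PySem.Chars.startswith (d.drop i) kr.1 = true := by
  unfold pvMatched
  simp only [List.mem_flatMap, List.mem_range, List.mem_filterMap]
  constructor
  · rintro ⟨i, hi, kr, hkr, hsome⟩
    by_cases h : PySem.Chars.startswith (d.drop i) kr.1 = true
    · simp [h] at hsome; exact ⟨i, hi, kr, hkr, hsome, h⟩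
    · simp [h] at hsome
  · rintro ⟨i, hi, kr, hkr, hr, h⟩
    exact ⟨i, hi, kr, hkr, by simp [h, hr]⟩

-- a nonempty keyword starts at some position of d iff it is a substring of d
theorem pvOccurs_iff (d kw : List Char) (hkw : kw ≠ []) :
    (∃ i < d.length, PySem.Chars.startswith (d.drop i) kw = true) ↔
      PySem.Chars.isIn kw d = true := by
  constructor
  · rintro ⟨i, _, h⟩
    exact (PySem.Chars.exists_prefix_drop_iff_isIn kw d).mp
      ⟨i, (PySem.Chars.startswith_iff _ _).mp h⟩
  · intro h
    rcases (PySem.Chars.exists_prefix_drop_iff_isIn kw d).mpr h with ⟨j, hj⟩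
    have hjlt : j < d.length := by
      by_contra hge
      rw [List.drop_eq_nil_of_le (le_of_not_gt hge)] at hj
      exact hkw (List.prefix_nil.mp hj)
    exact ⟨j, hjlt, (PySem.Chars.startswith_iff _ _).mpr hj⟩

-- rank r is in the matched list iff A's rank-r any-test succeeds
theorem pvMatched0 (d : List Char) :
    0 ∈ pvMatched d ↔
      (["senior", "lead", "principal", "5+ years", "7+ years"]).any
        (fun w => PySem.Chars.isIn w.toList d) = true := by
  rw [pvMem_matched_iff]
  constructor
  · rintro ⟨i, hi, kr, hkr, hr, h⟩
    simp only [pvKwRank, List.mem_cons, List.not_mem_nil, or_false] at hkr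
    rcases hkr with h1|h1|h1|h1|h1|h1|h1|h1|h1|h1|h1|h1|h1 <;> subst h1 <;>
      first
        | exact absurd hr (by decide)
        | (have hin := (pvOccurs_iff d _ (by decide)).mp ⟨i, hi, h⟩
           simp at hin
           simp [hin])
  · intro h
    simp only [List.any_cons, List.any_nil, Bool.or_eq_true, Bool.or_false] at h
    rcases h with h|h|h|h|h
    · rcases (pvOccurs_iff d "senior".toList (by decide)).mpr h with ⟨i, hi, hs⟩
      exact ⟨i, hi, ("senior".toList, 0), by simp [pvKwRank], rfl, hs⟩
    · rcases (pvOccurs_iff d "lead".toList (by decide)).mpr h with ⟨i, hi, hs⟩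
      exact ⟨i, hi, ("lead".toList, 0), by simp [pvKwRank], rfl, hs⟩
    · rcases (pvOccurs_iff d "principal".toList (by decide)).mpr h with ⟨i, hi, hs⟩
      exact ⟨i, hi, ("principal".toList, 0), by simp [pvKwRank], rfl, hs⟩
    · rcases (pvOccurs_iff d "5+ years".toList (by decide)).mpr h with ⟨i, hi, hs⟩
      exact ⟨i, hi, ("5+ years".toList, 0), by simp [pvKwRank], rfl, hs⟩
    · rcases (pvOccurs_iff d "7+ years".toList (by decide)).mpr h with ⟨i, hi, hs⟩
      exact ⟨i, hi, ("7+ years".toList, 0), by simp [pvKwRank], rfl, hs⟩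
theorem pvMatched1 (d : List Char) :
    1 ∈ pvMatched d ↔
      (["mid", "intermediate", "2-5 years", "3+ years"]).any
        (fun w => PySem.Chars.isIn w.toList d) = true := by
  rw [pvMem_matched_iff]
  constructor
  · rintro ⟨i, hi, kr, hkr, hr, h⟩
    simp only [pvKwRank, List.mem_cons, List.not_mem_nil, or_false] at hkr
    rcases hkr with h1|h1|h1|h1|h1|h1|h1|h1|h1|h1|h1|h1|h1 <;> subst h1 <;>
      first
        | exact absurd hr (by decide)
        | (have hin := (pvOccurs_iff d _ (by decide)).mp ⟨i, hi, h⟩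
           simp at hin
           simp [hin])
  · intro h
    simp only [List.any_cons, List.any_nil, Bool.or_eq_true, Bool.or_false] at h
    rcases h with h|h|h|h
    · rcases (pvOccurs_iff d "mid".toList (by decide)).mpr h with ⟨i, hi, hs⟩
      exact ⟨i, hi, ("mid".toList, 1), by simp [pvKwRank], rfl, hs⟩
    · rcases (pvOccurs_iff d "intermediate".toList (by decide)).mpr h with ⟨i, hi, hs⟩
      exact ⟨i, hi, ("intermediate".toList, 1), by simp [pvKwRank], rfl, hs⟩
    · rcases (pvOccurs_iff d "2-5 years".toList (by decide)).mpr h with ⟨i, hi, hs⟩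
      exact ⟨i, hi, ("2-5 years".toList, 1), by simp [pvKwRank], rfl, hs⟩
    · rcases (pvOccurs_iff d "3+ years".toList (by decide)).mpr h with ⟨i, hi, hs⟩
      exact ⟨i, hi, ("3+ years".toList, 1), by simp [pvKwRank], rfl, hs⟩
theorem pvMatched2 (d : List Char) :
    2 ∈ pvMatched d ↔
      (["junior", "entry", "graduate", "0-2 years"]).any
        (fun w => PySem.Chars.isIn w.toList d) = true := by
  rw [pvMem_matched_iff]
  constructor
  · rintro ⟨i, hi, kr, hkr, hr, h⟩
    simp only [pvKwRank, List.mem_cons, List.not_mem_nil, or_false] at hkr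
    rcases hkr with h1|h1|h1|h1|h1|h1|h1|h1|h1|h1|h1|h1|h1 <;> subst h1 <;>
      first
        | exact absurd hr (by decide)
        | (have hin := (pvOccurs_iff d _ (by decide)).mp ⟨i, hi, h⟩
           simp at hin
           simp [hin])
  · intro h
    simp only [List.any_cons, List.any_nil, Bool.or_eq_true, Bool.or_false] at h
    rcases h with h|h|h|h
    · rcases (pvOccurs_iff d "junior".toList (by decide)).mpr h with ⟨i, hi, hs⟩
      exact ⟨i, hi, ("junior".toList, 2), by simp [pvKwRank], rfl, hs⟩
    · rcases (pvOccurs_iff d "entry".toList (by decide)).mpr h with ⟨i, hi, hs⟩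
      exact ⟨i, hi, ("entry".toList, 2), by simp [pvKwRank], rfl, hs⟩
    · rcases (pvOccurs_iff d "graduate".toList (by decide)).mpr h with ⟨i, hi, hs⟩
      exact ⟨i, hi, ("graduate".toList, 2), by simp [pvKwRank], rfl, hs⟩
    · rcases (pvOccurs_iff d "0-2 years".toList (by decide)).mpr h with ⟨i, hi, hs⟩
      exact ⟨i, hi, ("0-2 years".toList, 2), by simp [pvKwRank], rfl, hs⟩

-- every matched rank is 0, 1 or 2
theorem pvMatched_lt_three (d : List Char) (r : Nat) (h : r ∈ pvMatched d) : r < 3 := by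
  rcases (pvMem_matched_iff d r).mp h with ⟨i, _, kr, hkr, hr, _⟩
  subst hr
  simp only [pvKwRank, List.mem_cons, List.not_mem_nil, or_false] at hkr
  rcases hkr with h1|h1|h1|h1|h1|h1|h1|h1|h1|h1|h1|h1|h1 <;> subst h1 <;> decide

-- ===== VERDICT (by name: the statement is the Claim_ definition above) =====
theorem normalize_experience_level_py_spec : Claim_equal_normalize_experience_level_py := by
  intro description _
  unfold Spec_normalize_experience_level_py normalize_experience_level_py
    normalize_experience_level_py_alt
  simp only [PySem.Str.isIn_eq, PySem.Str.toList_lower]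
  set d := PySem.Chars.lower description.toList with hd
  rw [pvBest_eq]
  set best := (pvMatched d).foldl min 3 with hbest
  by_cases h0 : (["senior", "lead", "principal", "5+ years", "7+ years"]).any
      (fun w => PySem.Chars.isIn w.toList d) = true
  · have hb : best = 0 :=
      Nat.le_zero.mp (pvFoldl_min_le_mem _ _ _ ((pvMatched0 d).mpr h0))
    simp [h0, hb, pvLevels]
  · have hb0 : best ≠ 0 := by
      intro hb
      rcases pvFoldl_min_eq_or_mem (pvMatched d) 3 with h | h <;> rw [← hbest] at h
      · omega
      · rw [hb] at h; exact h0 ((pvMatched0 d).mp h)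
    by_cases h1 : (["mid", "intermediate", "2-5 years", "3+ years"]).any
        (fun w => PySem.Chars.isIn w.toList d) = true
    · have hle : best ≤ 1 := pvFoldl_min_le_mem _ _ _ ((pvMatched1 d).mpr h1)
      have hb : best = 1 := by omega
      simp [h0, h1, hb, pvLevels]
    · have hb1 : best ≠ 1 := by
        intro hb
        rcases pvFoldl_min_eq_or_mem (pvMatched d) 3 with h | h <;> rw [← hbest] at h
        · omega
        · rw [hb] at h; exact h1 ((pvMatched1 d).mp h)
      by_cases h2 : (["junior", "entry", "graduate", "0-2 years"]).any
          (fun w => PySem.Chars.isIn w.toList d) = true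
      · have hle : best ≤ 2 := pvFoldl_min_le_mem _ _ _ ((pvMatched2 d).mpr h2)
        have hb : best = 2 := by omega
        simp [h0, h1, h2, hb, pvLevels]
      · have hb : best = 3 := by
          rcases pvFoldl_min_eq_or_mem (pvMatched d) 3 with h | h <;> rw [← hbest] at h
          · omega
          · have hlt := pvMatched_lt_three d best h
            interval_cases best
            · exact absurd ((pvMatched0 d).mp h) h0
            · exact absurd ((pvMatched1 d).mp h) h1
            · exact absurd ((pvMatched2 d).mp h) h2
        simp [h0, h1, h2, hb]
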